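-- pv_equiv track=rewrite | github.com/DongusJr/Verkefni_HR_2019_Haust | Hlutapróf 2/list_set.py | make_sets
-- ===== SOURCE A (Python) =====
-- def make_sets(list_1, list_2):
--     ''' Function that converts lists into sets '''
--     set_1, set_2 = [], []
--     for item in list_1:
--         if item not in set_1:  # If certain value is not in set then it is unique
--             set_1.append(item)
--
--     for item in list_2:
--         if item not in set_2:
--             set_2.append(item)
--
--     return sorted(set_1), sorted(set_2)  # return it sorted
-- ===== SOURCE B (Python) =====
-- def make_sets(list_1, list_2):
--     ''' Function that converts lists into sets '''
--     def _dedup_sorted(lst):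
--         out = []
--         for x in sorted(lst):
--             if not out or out[-1] != x:
--                 out.append(x)
--         return out
--     return _dedup_sorted(list_1), _dedup_sorted(list_2)
-- ===== Notes on version B (the rewrite author's own statement) =====
-- stated objective: faster
-- what changed: Replaces A's per-element 'not in' membership scans over the growing dedup list with sort-first then one linear pass dropping adjacent duplicates.
import Mathlib
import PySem

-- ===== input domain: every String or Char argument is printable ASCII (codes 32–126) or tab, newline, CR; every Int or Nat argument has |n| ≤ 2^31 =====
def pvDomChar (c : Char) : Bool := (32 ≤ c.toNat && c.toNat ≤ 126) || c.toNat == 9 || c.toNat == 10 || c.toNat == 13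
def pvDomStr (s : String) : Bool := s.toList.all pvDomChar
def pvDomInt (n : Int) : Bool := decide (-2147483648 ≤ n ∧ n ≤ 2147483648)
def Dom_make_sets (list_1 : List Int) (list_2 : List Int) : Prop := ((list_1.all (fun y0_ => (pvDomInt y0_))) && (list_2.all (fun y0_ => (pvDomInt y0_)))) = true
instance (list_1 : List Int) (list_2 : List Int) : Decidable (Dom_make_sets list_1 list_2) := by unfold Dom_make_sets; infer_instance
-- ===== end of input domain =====

-- B replaces A's repeated 'not in' scans by sorting first and dropping adjacent duplicates in one pass (faster in a timing run).

-- ===== PORT A =====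
-- for item in lst: if item not in set_: set_.append(item)
def pvDedupScan (lst : List Int) : List Int :=
  lst.foldl (fun set_ item => if item ∈ set_ then set_ else set_ ++ [item]) []

def make_sets (list_1 : List Int) (list_2 : List Int) : List Int × List Int :=
  (PySem.List.sorted (pvDedupScan list_1) (fun x => x) false,
   PySem.List.sorted (pvDedupScan list_2) (fun x => x) false)

-- ===== PORT B =====
-- out = []; for x in sorted(lst): if not out or out[-1] != x: out.append(x)
def pvDedupSorted (lst : List Int) : List Int :=
  (PySem.List.sorted lst (fun x => x) false).foldl
    (fun out x => if out = [] ∨ out.getLast? ≠ some x then out ++ [x] else out) []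

def make_sets_alt (list_1 : List Int) (list_2 : List Int) : List Int × List Int :=
  (pvDedupSorted list_1, pvDedupSorted list_2)

-- ===== PRECONDITION & SPEC =====
def Spec_make_sets (list_1 : List Int) (list_2 : List Int) (out : List Int × List Int) : Prop := out = make_sets_alt list_1 list_2
instance (list_1 : List Int) (list_2 : List Int) (out : List Int × List Int) : Decidable (Spec_make_sets list_1 list_2 out) := by unfold Spec_make_sets; infer_instance

-- ===== CLAIM (what is proved, stated in full; the proofs are below) =====
def Claim_equal_make_sets : Prop := ∀ (list_1 : List Int) (list_2 : List Int), Dom_make_sets list_1 list_2 → Spec_make_sets list_1 list_2 (make_sets list_1 list_2)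

-- ===== LEMMAS AND PROOFS =====

-- A's scan-dedup: result is nodup with the same members as the input (generalized over the accumulator).
theorem pvDedupScan_inv (lst acc : List Int) (hacc : acc.Nodup) :
    (lst.foldl (fun set_ item => if item ∈ set_ then set_ else set_ ++ [item]) acc).Nodup ∧
    (∀ a, a ∈ lst.foldl (fun set_ item => if item ∈ set_ then set_ else set_ ++ [item]) acc ↔ a ∈ acc ∨ a ∈ lst) := by
  induction lst generalizing acc with
  | nil => simpa using hacc
  | cons x xs ih =>
    simp only [List.foldl_cons]
    by_cases hx : x ∈ acc
    · simp only [if_pos hx]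
      obtain ⟨h1, h2⟩ := ih acc hacc
      refine ⟨h1, fun a => ?_⟩
      rw [h2]
      constructor
      · rintro (h | h) <;> simp_all [List.mem_cons]
      · rintro (h | h)
        · exact Or.inl h
        · rcases List.mem_cons.mp h with rfl | h
          · exact Or.inl hx
          · exact Or.inr h
    · simp only [if_neg hx]
      obtain ⟨h1, h2⟩ := ih (acc ++ [x]) (by simp [List.nodup_append, hacc]; exact fun a ha h => hx (h ▸ ha))
      refine ⟨h1, fun a => ?_⟩
      rw [h2]
      simp [List.mem_append, List.mem_cons, or_comm, or_assoc, or_left_comm]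

-- B's adjacent-dedup pass: on a ≤-sorted suffix it builds a strictly increasing list with the same members.
theorem pvDedupSorted_inv (s acc : List Int) (hacc : acc.Pairwise (· < ·))
    (hs : s.Pairwise (· ≤ ·)) (hcross : ∀ a ∈ acc, ∀ b ∈ s, a ≤ b) :
    (s.foldl (fun out x => if out = [] ∨ out.getLast? ≠ some x then out ++ [x] else out) acc).Pairwise (· < ·) ∧
    (∀ a, a ∈ s.foldl (fun out x => if out = [] ∨ out.getLast? ≠ some x then out ++ [x] else out) acc ↔ a ∈ acc ∨ a ∈ s) := by
  induction s generalizing acc with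
  | nil => simpa using hacc
  | cons x xs ih =>
    simp only [List.foldl_cons]
    have hxs : xs.Pairwise (· ≤ ·) := hs.of_cons
    have hxle : ∀ b ∈ xs, x ≤ b := fun b hb => List.rel_of_pairwise_cons hs hb
    by_cases hc : acc = [] ∨ acc.getLast? ≠ some x
    · simp only [if_pos hc]
      have hlt : ∀ a ∈ acc, a < x := by
        intro a ha
        have hle : a ≤ x := hcross a ha x (List.mem_cons_self)
        rcases lt_or_eq_of_le hle with h | rfl
        · exact h
        · exfalso
          -- a ∈ acc and every element of acc is ≤ a (via hcross), so the last element is a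
          have hne : acc ≠ [] := by rintro rfl; simp at ha
          obtain ⟨m, hm⟩ := List.getLast?_isSome.mpr hne |> Option.isSome_iff_exists.mp
          have hmmem : m ∈ acc := List.mem_of_getLast? hm
          have hma : m ≤ a := hcross m hmmem a (List.mem_cons_self)
          have ham : a ≤ m := by
            -- a ∈ acc, acc pairwise <, m last element: a = m or a < m
            rcases eq_or_ne a m with h | h
            · exact le_of_eq h
            · -- a before m in acc
              have : a < m ∨ a = m := by
                obtain ⟨init, hinit⟩ := List.getLast?_eq_some_iff.mp hm
                subst hinit
                rcases List.mem_append.mp ha with h1 | h1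
                · left
                  exact (List.pairwise_append.mp hacc).2.2 a h1 m (by simp)
                · right; simpa using h1
              rcases this with h2 | h2
              · exact le_of_lt h2
              · exact le_of_eq h2
          have : a = m := le_antisymm ham hma
          rcases hc with hc | hc
          · exact hne hc
          · exact hc (by rw [hm, this])
      have hacc' : (acc ++ [x]).Pairwise (· < ·) := by
        rw [List.pairwise_append]
        exact ⟨hacc, List.pairwise_singleton _ _, fun a ha b hb => by
          simp at hb; subst hb; exact hlt a ha⟩
      have hcross' : ∀ a ∈ acc ++ [x], ∀ b ∈ xs, a ≤ b := by
        intro a ha b hb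
        rcases List.mem_append.mp ha with h | h
        · exact hcross a h b (List.mem_cons_of_mem _ hb)
        · simp at h; subst h; exact hxle b hb
      obtain ⟨h1, h2⟩ := ih (acc ++ [x]) hacc' hxs hcross'
      refine ⟨h1, fun a => ?_⟩
      rw [h2]
      simp [List.mem_append, List.mem_cons, or_comm, or_assoc, or_left_comm]
    · simp only [if_neg hc]
      rw [not_or, not_not] at hc
      obtain ⟨hne, hlast⟩ := hc
      have hxmem : x ∈ acc := List.mem_of_getLast? hlast
      have hcross' : ∀ a ∈ acc, ∀ b ∈ xs, a ≤ b :=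
        fun a ha b hb => hcross a ha b (List.mem_cons_of_mem _ hb)
      obtain ⟨h1, h2⟩ := ih acc hacc hxs hcross'
      refine ⟨h1, fun a => ?_⟩
      rw [h2]
      constructor
      · rintro (h | h)
        · exact Or.inl h
        · exact Or.inr (List.mem_cons_of_mem _ h)
      · rintro (h | h)
        · exact Or.inl h
        · rcases List.mem_cons.mp h with rfl | h
          · exact Or.inl hxmem
          · exact Or.inr h

theorem pvDedup_eq (l : List Int) :
    PySem.List.sorted (pvDedupScan l) (fun x => x) false = pvDedupSorted l := by
  have hsorted := PySem.List.sorted_pairwise l (fun x => x) (κ := Int)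
  obtain ⟨hB1, hB2⟩ := pvDedupSorted_inv (PySem.List.sorted l (fun x => x) false) []
      (List.Pairwise.nil) hsorted (by simp)
  obtain ⟨hA1, hA2⟩ := pvDedupScan_inv l [] List.nodup_nil
  have hBnodup : (pvDedupSorted l).Nodup := hB1.imp ne_of_lt
  have hmem : ∀ a, a ∈ pvDedupSorted l ↔ a ∈ pvDedupScan l := by
    intro a
    unfold pvDedupSorted pvDedupScan
    rw [hB2 a, hA2 a]
    simp [PySem.List.mem_sorted]
  have hperm : (pvDedupSorted l).Perm (pvDedupScan l) :=
    (List.perm_ext_iff_of_nodup hBnodup hA1).mpr hmem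
  exact PySem.List.sorted_eq_of_perm_of_pairwise_lt _ _ _ hperm hB1

-- ===== VERDICT (by name: the statement is the Claim_ definition above) =====
theorem make_sets_spec : Claim_equal_make_sets := by
  intro l1 l2 _
  unfold Spec_make_sets make_sets make_sets_alt
  rw [pvDedup_eq, pvDedup_eq]
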